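-- pv_equiv track=rewrite | github.com/DamienALOUGES/chatbot-with-kraken-api | backend.py | sentence_analyse
-- ===== SOURCE A (Python) =====
-- greeting_input = ("hello", "hi", "greetings", "what's up","hey",)
--
-- farewell_input=("bye","goodbye")
--
-- simple_question_input=("open","close","high","low","vwap","volume")
--
-- possible_pairs=("bcheur","bchusd","bchxbt","xxbtzeur","xbtzusd","xethxxbt","xethzusd","xethzeur")
--
-- predictions_input=("short","long","short-term","long-term")
--
-- sample_input=("yesterday","week", "weeks")
--
-- def sentence_analyse(sentence):
--     sentence = sentence.lower()
--     words = {'greet':'','bye':'', 'pair':'','simple_param':'','prediction_type':'', 'sample':''}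
--     for word in sentence.split():
--         if word.lower() in greeting_input:
--             words.update({'greet':word})
--         elif word.lower() in farewell_input:
--             words.update({'bye':word})
--         elif word.lower() in possible_pairs:
--             words.update({'pair':word.upper()})
--         elif word.lower() in simple_question_input:
--             words.update({'simple_param':word})
--         elif word.lower() in predictions_input:
--             words.update({'prediction_type':word})
--         elif word.lower() in sample_input:
--             words.update({'sample':word})
--     return words
-- ===== SOURCE B (Python) =====
-- greeting_input = ("hello", "hi", "greetings", "what's up","hey",)
-- farewell_input=("bye","goodbye")
-- simple_question_input=("open","close","high","low","vwap","volume")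
-- possible_pairs=("bcheur","bchusd","bchxbt","xxbtzeur","xbtzusd","xethxxbt","xethzusd","xethzeur")
-- predictions_input=("short","long","short-term","long-term")
-- sample_input=("yesterday","week", "weeks")
--
-- FIELDS = (('greet', greeting_input), ('bye', farewell_input), ('pair', possible_pairs),
--           ('simple_param', simple_question_input), ('prediction_type', predictions_input),
--           ('sample', sample_input))
--
-- def sentence_analyse(sentence):
--     ws = sentence.lower().split()
--     # The six keyword sets are pairwise disjoint, so each field's final value is
--     # simply the last word of the sentence that belongs to that field's set.
--     out = {}
--     for field, keywords in FIELDS: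
--         hit = next((w for w in reversed(ws) if w in keywords), '')
--         out[field] = hit.upper() if field == 'pair' else hit
--     return out
-- ===== Notes on version B (the rewrite author's own statement) =====
-- stated objective: alternative
-- what changed: Instead of A's single forward pass that mutates a result dict through a six-way if/elif membership chain, B computes each of the six fields independently in a staged per-field pass: the value of a field is the last word of the sentence found in that field's keyword set (searched over the reversed word list), which is correct because the six keyword sets are pairwise disjoint and A's overwrites are last-write-wins.
import Mathlib
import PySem

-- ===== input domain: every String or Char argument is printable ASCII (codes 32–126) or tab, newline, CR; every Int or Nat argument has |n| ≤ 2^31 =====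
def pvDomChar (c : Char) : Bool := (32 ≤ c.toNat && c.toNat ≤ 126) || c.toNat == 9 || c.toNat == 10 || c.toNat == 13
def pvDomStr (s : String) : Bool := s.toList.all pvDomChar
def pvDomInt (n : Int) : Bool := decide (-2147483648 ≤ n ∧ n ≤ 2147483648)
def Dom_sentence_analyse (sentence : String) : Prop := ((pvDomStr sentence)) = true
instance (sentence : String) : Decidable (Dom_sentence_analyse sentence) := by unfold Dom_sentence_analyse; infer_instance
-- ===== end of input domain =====

-- B replaces A's single forward pass with a six-way if/elif chain mutating a result dict by
-- six independent per-field passes, each taking the last matching word of the reversed word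
-- list (the keyword sets are disjoint, and A's overwrites are last-write-wins); objective: alternative.


-- ===== PORT A =====
-- the module-level keyword tuples, shared by both programs
def pvGreetingInput : List String := ["hello", "hi", "greetings", "what's up", "hey"]
def pvFarewellInput : List String := ["bye", "goodbye"]
def pvSimpleQuestionInput : List String := ["open", "close", "high", "low", "vwap", "volume"]
def pvPossiblePairs : List String := ["bcheur", "bchusd", "bchxbt", "xxbtzeur", "xbtzusd", "xethxxbt", "xethzusd", "xethzeur"]
def pvPredictionsInput : List String := ["short", "long", "short-term", "long-term"]
def pvSampleInput : List String := ["yesterday", "week", "weeks"]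

-- the pre-populated result dict of A
def pvInitWords : PySem.Dict String String :=
  PySem.Dict.mk [("greet", ""), ("bye", ""), ("pair", ""), ("simple_param", ""), ("prediction_type", ""), ("sample", "")]

-- A's loop body: the six-way if/elif membership chain
def pvStepA (d : PySem.Dict String String) (word : String) : PySem.Dict String String :=
  if pvGreetingInput.contains (PySem.Str.lower word) then d.insert "greet" word
  else if pvFarewellInput.contains (PySem.Str.lower word) then d.insert "bye" word
  else if pvPossiblePairs.contains (PySem.Str.lower word) then d.insert "pair" (PySem.Str.upper word)
  else if pvSimpleQuestionInput.contains (PySem.Str.lower word) then d.insert "simple_param" word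
  else if pvPredictionsInput.contains (PySem.Str.lower word) then d.insert "prediction_type" word
  else if pvSampleInput.contains (PySem.Str.lower word) then d.insert "sample" word
  else d

def sentence_analyse (sentence : String) : List (String × String) :=
  ((PySem.Str.split₀ (PySem.Str.lower sentence)).foldl pvStepA pvInitWords).items

-- ===== PORT B =====
-- the FIELDS table of Source B
def pvFields : List (String × List String) :=
  [("greet", pvGreetingInput), ("bye", pvFarewellInput), ("pair", pvPossiblePairs),
   ("simple_param", pvSimpleQuestionInput), ("prediction_type", pvPredictionsInput),
   ("sample", pvSampleInput)]

-- Source B's per-field value: last matching word ('next' over 'reversed(ws)'), '' if none,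
-- uppercased for the 'pair' field
def pvPick (field : String) (keywords : List String) (ws : List String) : String :=
  let hit := (ws.reverse.find? (fun w => keywords.contains w)).getD ""
  if field == "pair" then PySem.Str.upper hit else hit

def sentence_analyse_alt (sentence : String) : List (String × String) :=
  let ws := PySem.Str.split₀ (PySem.Str.lower sentence)
  (pvFields.foldl (fun d p => d.insert p.1 (pvPick p.1 p.2 ws)) (PySem.Dict.mk [])).items

-- ===== PRECONDITION & SPEC =====
def Spec_sentence_analyse (sentence : String) (out : List (String × String)) : Prop := out = sentence_analyse_alt sentence
instance (sentence : String) (out : List (String × String)) : Decidable (Spec_sentence_analyse sentence out) := by unfold Spec_sentence_analyse; infer_instance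

-- ===== CLAIM =====
def Claim_equal_sentence_analyse : Prop := ∀ (sentence : String), Dom_sentence_analyse sentence → Spec_sentence_analyse sentence (sentence_analyse sentence)

-- ===== LEMMAS AND PROOFS =====

-- every character of a word produced by split₀.go comes from the input, the current chunk, or the accumulator
lemma pvGoChars (s : List Char) : ∀ (cur : List Char) (acc : List (List Char)) (w : List Char),
    w ∈ PySem.Chars.split₀.go s cur acc →
    ∀ c ∈ w, c ∈ s ∨ c ∈ cur ∨ ∃ a ∈ acc, c ∈ a := by
  induction s with
  | nil =>
    intro cur acc w hw c hc
    simp only [PySem.Chars.split₀.go] at hw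
    split at hw
    · exact Or.inr (Or.inr ⟨w, List.mem_reverse.1 hw, hc⟩)
    · rcases List.mem_cons.1 (List.mem_reverse.1 hw) with rfl | h
      · exact Or.inr (Or.inl (List.mem_reverse.1 hc))
      · exact Or.inr (Or.inr ⟨w, h, hc⟩)
  | cons x rest ih =>
    intro cur acc w hw c hc
    simp only [PySem.Chars.split₀.go] at hw
    split at hw
    · split at hw
      · rcases ih [] acc w hw c hc with h | h | h
        · exact Or.inl (List.mem_cons_of_mem _ h)
        · simp at h
        · exact Or.inr (Or.inr h)
      · rcases ih [] (cur.reverse :: acc) w hw c hc with h | h | h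
        · exact Or.inl (List.mem_cons_of_mem _ h)
        · simp at h
        · rcases h with ⟨a, ha, hca⟩
          rcases List.mem_cons.1 ha with rfl | ha'
          · exact Or.inr (Or.inl (List.mem_reverse.1 hca))
          · exact Or.inr (Or.inr ⟨a, ha', hca⟩)
    · rcases ih (x :: cur) acc w hw c hc with h | h | h
      · exact Or.inl (List.mem_cons_of_mem _ h)
      · rcases List.mem_cons.1 h with rfl | h'
        · exact Or.inl (List.mem_cons_self ..)
        · exact Or.inr (Or.inl h')
      · exact Or.inr (Or.inr h)

-- lowering is idempotent on a single character
lemma pvLowerChar_idem (c : Char) :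
    PySem.Chars.lowerChar (PySem.Chars.lowerChar c) = PySem.Chars.lowerChar c := by
  unfold PySem.Chars.lowerChar PySem.Chars.isupper
  simp only [Bool.and_eq_true, decide_eq_true_eq]
  by_cases h : ('A' ≤ c ∧ c ≤ 'Z')
  · have h1 : 65 ≤ c.toNat := by
      have := h.1; rw [Char.le_def, UInt32.le_iff_toNat_le] at this; exact this
    have h2 : c.toNat ≤ 90 := by
      have := h.2; rw [Char.le_def, UInt32.le_iff_toNat_le] at this; exact this
    have hval : (c.toNat + 32).isValidChar := Or.inl (by omega)
    have htn : (Char.ofNat (c.toNat + 32)).toNat = c.toNat + 32 := by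
      rw [Char.toNat_ofNat, if_pos hval]
    rw [if_pos h, if_neg]
    intro hh
    have hle : (Char.ofNat (c.toNat + 32)).toNat ≤ ('Z' : Char).toNat := by
      have := hh.2; rw [Char.le_def, UInt32.le_iff_toNat_le] at this; exact this
    have hz : ('Z' : Char).toNat = 90 := rfl
    omega
  · rw [if_neg h, if_neg h]

-- every word of split₀ applied to a lowered string is itself already lowered
lemma pvSplitLowerFix (s w : String) (hw : w ∈ PySem.Str.split₀ (PySem.Str.lower s)) :
    PySem.Str.lower w = w := by
  unfold PySem.Str.split₀ PySem.Str.lower at hw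
  rcases List.mem_map.1 hw with ⟨ws, hws, rfl⟩
  rw [String.toList_ofList] at hws
  unfold PySem.Chars.split₀ at hws
  have hchars := pvGoChars _ [] [] ws hws
  unfold PySem.Str.lower
  rw [String.toList_ofList]
  have : PySem.Chars.lower ws = ws := by
    unfold PySem.Chars.lower at *
    calc List.map PySem.Chars.lowerChar ws = List.map id ws := by
          apply List.map_congr_left
          intro c hc
          rcases hchars c hc with h | h | h
          · rcases List.mem_map.1 h with ⟨c', _, rfl⟩
            exact pvLowerChar_idem c'
          · simp at h
          · simp at h
      _ = ws := List.map_id ws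
  rw [this]

-- disjointness: a word in one keyword set is in none of the other five
lemma pvDisj1 (w : String) (h : pvGreetingInput.contains w = true) :
    pvFarewellInput.contains w = false ∧ pvPossiblePairs.contains w = false ∧
    pvSimpleQuestionInput.contains w = false ∧ pvPredictionsInput.contains w = false ∧
    pvSampleInput.contains w = false := by
  have hm : w ∈ pvGreetingInput := by simpa using h
  fin_cases hm <;> decide

lemma pvDisj2 (w : String) (h : pvFarewellInput.contains w = true) :
    pvPossiblePairs.contains w = false ∧ pvSimpleQuestionInput.contains w = false ∧
    pvPredictionsInput.contains w = false ∧ pvSampleInput.contains w = false := by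
  have hm : w ∈ pvFarewellInput := by simpa using h
  fin_cases hm <;> decide

lemma pvDisj3 (w : String) (h : pvPossiblePairs.contains w = true) :
    pvSimpleQuestionInput.contains w = false ∧ pvPredictionsInput.contains w = false ∧
    pvSampleInput.contains w = false := by
  have hm : w ∈ pvPossiblePairs := by simpa using h
  fin_cases hm <;> decide

lemma pvDisj4 (w : String) (h : pvSimpleQuestionInput.contains w = true) :
    pvPredictionsInput.contains w = false ∧ pvSampleInput.contains w = false := by
  have hm : w ∈ pvSimpleQuestionInput := by simpa using h
  fin_cases hm <;> decide

lemma pvDisj5 (w : String) (h : pvPredictionsInput.contains w = true) :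
    pvSampleInput.contains w = false := by
  have hm : w ∈ pvPredictionsInput := by simpa using h
  fin_cases hm <;> decide

-- appending one word to the sentence updates each pvPick value as expected
lemma pvPick_append (f : String) (kws ws : List String) (w : String) :
    pvPick f kws (ws ++ [w]) =
      if kws.contains w then (if f == "pair" then PySem.Str.upper w else w)
      else pvPick f kws ws := by
  unfold pvPick
  rw [List.reverse_append]
  simp only [List.reverse_cons, List.reverse_nil, List.nil_append, List.singleton_append,
    List.find?_cons]
  cases hc : kws.contains w <;> simp

-- characterization of A's fold: the dict after the loop holds, per field, the last matching word
lemma pvFoldA (ws : List String) (h : ∀ w ∈ ws, PySem.Str.lower w = w) :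
    ws.foldl pvStepA pvInitWords = PySem.Dict.mk
      [("greet", pvPick "greet" pvGreetingInput ws),
       ("bye", pvPick "bye" pvFarewellInput ws),
       ("pair", pvPick "pair" pvPossiblePairs ws),
       ("simple_param", pvPick "simple_param" pvSimpleQuestionInput ws),
       ("prediction_type", pvPick "prediction_type" pvPredictionsInput ws),
       ("sample", pvPick "sample" pvSampleInput ws)] := by
  induction ws using List.reverseRecOn with
  | nil => rfl
  | append_singleton ws w ih =>
    have hws : ∀ v ∈ ws, PySem.Str.lower v = v := fun v hv => h v (List.mem_append_left _ hv)
    have hw : PySem.Str.lower w = w := h w (List.mem_append_right _ (List.mem_singleton.2 rfl))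
    rw [List.foldl_append, List.foldl_cons, List.foldl_nil, ih hws]
    simp only [pvPick_append]
    unfold pvStepA
    rw [hw]
    by_cases c1 : pvGreetingInput.contains w = true
    · obtain ⟨d2, d3, d4, d5, d6⟩ := pvDisj1 w c1
      have m1 : w ∈ pvGreetingInput := by simpa using c1
      have n2 : w ∉ pvFarewellInput := by simpa using d2
      have n3 : w ∉ pvPossiblePairs := by simpa using d3
      have n4 : w ∉ pvSimpleQuestionInput := by simpa using d4
      have n5 : w ∉ pvPredictionsInput := by simpa using d5
      have n6 : w ∉ pvSampleInput := by simpa using d6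
      simp [m1, n2, n3, n4, n5, n6, PySem.Dict.insert]
    · have n1 : w ∉ pvGreetingInput := by simpa using c1
      rw [if_neg c1]
      by_cases c2 : pvFarewellInput.contains w = true
      · obtain ⟨d3, d4, d5, d6⟩ := pvDisj2 w c2
        have m2 : w ∈ pvFarewellInput := by simpa using c2
        have n3 : w ∉ pvPossiblePairs := by simpa using d3
        have n4 : w ∉ pvSimpleQuestionInput := by simpa using d4
        have n5 : w ∉ pvPredictionsInput := by simpa using d5
        have n6 : w ∉ pvSampleInput := by simpa using d6
        simp [n1, m2, n3, n4, n5, n6, PySem.Dict.insert]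
      · have n2 : w ∉ pvFarewellInput := by simpa using c2
        rw [if_neg c2]
        by_cases c3 : pvPossiblePairs.contains w = true
        · obtain ⟨d4, d5, d6⟩ := pvDisj3 w c3
          have m3 : w ∈ pvPossiblePairs := by simpa using c3
          have n4 : w ∉ pvSimpleQuestionInput := by simpa using d4
          have n5 : w ∉ pvPredictionsInput := by simpa using d5
          have n6 : w ∉ pvSampleInput := by simpa using d6
          simp [n1, n2, m3, n4, n5, n6, PySem.Dict.insert]
        · have n3 : w ∉ pvPossiblePairs := by simpa using c3
          rw [if_neg c3]
          by_cases c4 : pvSimpleQuestionInput.contains w = true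
          · obtain ⟨d5, d6⟩ := pvDisj4 w c4
            have m4 : w ∈ pvSimpleQuestionInput := by simpa using c4
            have n5 : w ∉ pvPredictionsInput := by simpa using d5
            have n6 : w ∉ pvSampleInput := by simpa using d6
            simp [n1, n2, n3, m4, n5, n6, PySem.Dict.insert]
          · have n4 : w ∉ pvSimpleQuestionInput := by simpa using c4
            rw [if_neg c4]
            by_cases c5 : pvPredictionsInput.contains w = true
            · have d6 := pvDisj5 w c5
              have m5 : w ∈ pvPredictionsInput := by simpa using c5
              have n6 : w ∉ pvSampleInput := by simpa using d6
              simp [n1, n2, n3, n4, m5, n6, PySem.Dict.insert]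
            · have n5 : w ∉ pvPredictionsInput := by simpa using c5
              rw [if_neg c5]
              by_cases c6 : pvSampleInput.contains w = true
              · have m6 : w ∈ pvSampleInput := by simpa using c6
                simp [n1, n2, n3, n4, n5, m6, PySem.Dict.insert]
              · have n6 : w ∉ pvSampleInput := by simpa using c6
                rw [if_neg c6]
                simp [n1, n2, n3, n4, n5, n6]

-- ===== VERDICT =====
theorem sentence_analyse_spec : Claim_equal_sentence_analyse := by
  intro s _
  show sentence_analyse s = sentence_analyse_alt s
  unfold sentence_analyse sentence_analyse_alt
  rw [pvFoldA _ (fun w hw => pvSplitLowerFix s w hw)]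
  simp [pvFields, PySem.Dict.insert]
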